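-- pv_equiv track=rewrite | github.com/Eythan31/paleographic-networks | SPARK-main-script-with-GUI.py | build_features_per_body_part_dictionary
-- ===== SOURCE A (Python) =====
-- def build_features_per_body_part_dictionary(l):
--     d={}
--     for i in range(1, len(l)):#skip first row
--         name = l[i][0]
--         full_feature = l[i][1]
--
--         if full_feature != "":
--             letter = full_feature[0]
--             body_part = letter + ":" + get_full_body_part(full_feature)
--             terminal_feature = get_terminal_feature(full_feature)
--             if body_part not in d:
--                 d[body_part] = [terminal_feature]
--             elif terminal_feature not in d[body_part]:
--                 d[body_part].append(terminal_feature)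
--     return d
--
-- def get_terminal_feature(full_feature):
--     if full_feature == "":
--         return ""
--     else:
--         return full_feature.split(":")[-1]
--
-- def get_full_body_part(full_feature):
--     if full_feature == "":
--         return ""
--     else:
--         splits = full_feature.split(":")
--         if(len(splits)==3):
--             return splits[1]
--         else:
--             return ':'.join(splits[1:-1])
-- ===== SOURCE B (Python) =====
-- def build_features_per_body_part_dictionary(l):
--     # Phase 1: parse every data row into a (body_part, terminal_feature) pair.
--     pairs = []
--     for row in l[1:]:
--         full_feature = row[1]
--         if full_feature != "":
--             body_part = full_feature[0] + ":" + get_full_body_part(full_feature)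
--             pairs.append((body_part, get_terminal_feature(full_feature)))
--     # Phase 2: group unconditionally (values may contain duplicates).
--     d = {}
--     for bp, tf in pairs:
--         d.setdefault(bp, []).append(tf)
--     # Phase 3: collapse duplicates, keeping first-occurrence order.
--     return {bp: list(dict.fromkeys(feats)) for bp, feats in d.items()}
--
-- def get_terminal_feature(full_feature):
--     if full_feature == "":
--         return ""
--     else:
--         return full_feature.split(":")[-1]
--
-- def get_full_body_part(full_feature):
--     if full_feature == "":
--         return ""
--     else:
--         splits = full_feature.split(":")
--         if(len(splits)==3):
--             return splits[1]
--         else: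
--             return ':'.join(splits[1:-1])
-- ===== Notes on version B (the rewrite author's own statement) =====
-- stated objective: alternative
-- what changed: Single indexed loop with an inline membership test replaced by a three-phase pipeline: parse rows to (body_part, terminal) pairs, group them unconditionally with setdefault/append, then dedup each group with dict.fromkeys; the inline 'not in' test disappears.
import Mathlib
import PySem

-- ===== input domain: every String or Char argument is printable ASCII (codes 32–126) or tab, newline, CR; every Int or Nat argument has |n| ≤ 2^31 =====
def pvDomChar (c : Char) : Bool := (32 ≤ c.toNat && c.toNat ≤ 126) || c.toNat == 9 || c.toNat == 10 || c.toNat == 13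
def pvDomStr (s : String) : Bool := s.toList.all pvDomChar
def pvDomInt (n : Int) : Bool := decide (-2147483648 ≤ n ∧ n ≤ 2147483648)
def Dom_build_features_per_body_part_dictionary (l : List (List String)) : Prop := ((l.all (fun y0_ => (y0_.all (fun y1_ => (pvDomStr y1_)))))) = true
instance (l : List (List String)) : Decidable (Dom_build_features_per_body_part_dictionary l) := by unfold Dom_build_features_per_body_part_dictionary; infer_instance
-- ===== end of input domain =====

-- B replaces A's single indexed loop with its inline membership test by a parse / group / dedup pipeline (alternative decomposition, same cost).

-- ===== PORT A =====
def get_terminal_feature (full_feature : String) : String :=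
  if full_feature = "" then ""
  else PySem.List.pyGetD ((PySem.Str.split? full_feature ":").getD []) (-1) ""

def get_full_body_part (full_feature : String) : String :=
  if full_feature = "" then ""
  else
    let splits := (PySem.Str.split? full_feature ":").getD []
    if splits.length = 3 then PySem.List.pyGetD splits 1 ""
    else PySem.Str.join ":" (PySem.List.slice splits (some 1) (some (-1)))

def build_features_per_body_part_dictionary (l : List (List String)) : List (String × List String) :=
  (List.foldl (fun (d : PySem.Dict String (List String)) i =>
      let row := PySem.List.pyGetD l i []
      let _name := PySem.List.pyGetD row 0 ""
      let full_feature := PySem.List.pyGetD row 1 ""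
      if full_feature ≠ "" then
        let body_part := ((PySem.Str.pyGet? full_feature 0).map (fun c => String.mk [c])).getD "" ++ ":" ++ get_full_body_part full_feature
        let terminal_feature := get_terminal_feature full_feature
        if d.contains body_part = false then d.insert body_part [terminal_feature]
        else if terminal_feature ∉ d.getD body_part [] then d.modify body_part [] (fun v => v ++ [terminal_feature])
        else d
      else d)
    (PySem.Dict.mk []) (PySem.List.pyRange 1 (PySem.List.len l))).items

-- ===== PORT B =====
def build_features_per_body_part_dictionary_alt (l : List (List String)) : List (String × List String) :=
  let pairs := (PySem.List.slice l (some 1) none).foldl (fun (acc : List (String × String)) row =>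
      let full_feature := PySem.List.pyGetD row 1 ""
      if full_feature ≠ "" then
        acc ++ [(((PySem.Str.pyGet? full_feature 0).map (fun c => String.mk [c])).getD "" ++ ":" ++ get_full_body_part full_feature,
                 get_terminal_feature full_feature)]
      else acc) []
  let d := pairs.foldl (fun (d : PySem.Dict String (List String)) p => d.modify p.1 [] (fun v => v ++ [p.2])) (PySem.Dict.mk [])
  d.items.map (fun p => (p.1, PySem.List.dedup p.2))

-- ===== PRECONDITION & SPEC =====
-- Pre_ excludes exactly the inputs on which Python A raises IndexError: some data row (a row after the first) has fewer than 2 entries.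
def Pre_build_features_per_body_part_dictionary (l : List (List String)) : Prop :=
  ∀ row ∈ l.drop 1, 2 ≤ row.length
instance (l : List (List String)) : Decidable (Pre_build_features_per_body_part_dictionary l) := by unfold Pre_build_features_per_body_part_dictionary; infer_instance

def pvWitness_build_features_per_body_part_dictionary : List (List String) :=
  [["name", "feature"], ["n1", "A:arm:long"], ["n2", ""], ["n3", "A:arm:long"]]

def Spec_build_features_per_body_part_dictionary (l : List (List String)) (out : List (String × List String)) : Prop := out = build_features_per_body_part_dictionary_alt l
instance (l : List (List String)) (out : List (String × List String)) : Decidable (Spec_build_features_per_body_part_dictionary l out) := by unfold Spec_build_features_per_body_part_dictionary; infer_instance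

-- ===== CLAIM (what is proved, stated in full; the proofs are below) =====
def Claim_equal_build_features_per_body_part_dictionary : Prop := ∀ (l : List (List String)), Dom_build_features_per_body_part_dictionary l → Pre_build_features_per_body_part_dictionary l → Spec_build_features_per_body_part_dictionary l (build_features_per_body_part_dictionary l)

-- ===== LEMMAS AND PROOFS =====

-- A's per-row update (the body of A's loop, with the row already fetched)
def rowStepA (d : PySem.Dict String (List String)) (row : List String) : PySem.Dict String (List String) :=
  let _name := PySem.List.pyGetD row 0 ""
  let full_feature := PySem.List.pyGetD row 1 ""
  if full_feature ≠ "" then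
    let body_part := ((PySem.Str.pyGet? full_feature 0).map (fun c => String.mk [c])).getD "" ++ ":" ++ get_full_body_part full_feature
    let terminal_feature := get_terminal_feature full_feature
    if d.contains body_part = false then d.insert body_part [terminal_feature]
    else if terminal_feature ∉ d.getD body_part [] then d.modify body_part [] (fun v => v ++ [terminal_feature])
    else d
  else d

-- B's pair-collecting step and grouping step
def pairStep (acc : List (String × String)) (row : List String) : List (String × String) :=
  let full_feature := PySem.List.pyGetD row 1 ""
  if full_feature ≠ "" then
    acc ++ [(((PySem.Str.pyGet? full_feature 0).map (fun c => String.mk [c])).getD "" ++ ":" ++ get_full_body_part full_feature,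
             get_terminal_feature full_feature)]
  else acc

def modStep (d : PySem.Dict String (List String)) (p : String × String) : PySem.Dict String (List String) :=
  d.modify p.1 [] (fun v => v ++ [p.2])

-- B's two phases fused into one per-row step (proof device)
def rowStepB (d : PySem.Dict String (List String)) (row : List String) : PySem.Dict String (List String) :=
  let full_feature := PySem.List.pyGetD row 1 ""
  if full_feature ≠ "" then
    modStep d (((PySem.Str.pyGet? full_feature 0).map (fun c => String.mk [c])).getD "" ++ ":" ++ get_full_body_part full_feature,
               get_terminal_feature full_feature)
  else d

-- value-wise dedup of a dict: the relation between A's running dict and B's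
def mapDedup (d : PySem.Dict String (List String)) : PySem.Dict String (List String) :=
  PySem.Dict.mk (d.items.map (fun p => (p.1, PySem.List.dedup p.2)))

lemma contains_mapDedup (d : PySem.Dict String (List String)) (k : String) :
    (mapDedup d).contains k = d.contains k := by
  simp [mapDedup, PySem.Dict.contains, List.any_map, Function.comp_def]

lemma get?_mapDedup (d : PySem.Dict String (List String)) (k : String) :
    (mapDedup d).get? k = (d.get? k).map PySem.List.dedup := by
  simp [mapDedup, PySem.Dict.get?]
  induction d.items with
  | nil => simp
  | cons p rest ih => by_cases h : p.1 == k <;> simp [List.find?, h, ih]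

lemma insert_mapDedup (d : PySem.Dict String (List String)) (k : String) (w : List String) :
    mapDedup (d.insert k w) = (mapDedup d).insert k (PySem.List.dedup w) := by
  apply PySem.Dict.ext
  have hc := contains_mapDedup d k
  simp only [mapDedup] at hc ⊢
  rw [PySem.Dict.items_insert, PySem.Dict.items_insert, hc]
  by_cases h : d.contains k = true
  · simp only [h, if_pos, List.map_map]
    apply List.map_congr_left
    intro p hp
    by_cases hk : p.1 = k <;> simp [hk]
  · simp [h]

lemma get?_none_of_not_contains (d : PySem.Dict String (List String)) (k : String)
    (h : d.contains k = false) : d.get? k = none := by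
  simp only [PySem.Dict.contains, List.any_eq_false] at h
  simp only [PySem.Dict.get?, Option.map_eq_none_iff, List.find?_eq_none]
  exact h

lemma get?_some_of_contains (d : PySem.Dict String (List String)) (k : String)
    (h : d.contains k = true) : ∃ v, d.get? k = some v := by
  simp only [PySem.Dict.contains, List.any_eq_true] at h
  obtain ⟨p, hp, he⟩ := h
  have h2 : (List.find? (fun q : String × List String => q.1 == k) d.items).isSome := by
    rw [List.find?_isSome]; exact ⟨p, hp, he⟩
  obtain ⟨q, hq⟩ := Option.isSome_iff_exists.1 h2
  exact ⟨q.2, by simp [PySem.Dict.get?, hq]⟩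

lemma key_unique (items : List (String × List String)) (hnd : (items.map Prod.fst).Nodup) :
    ∀ p ∈ items, ∀ q ∈ items, p.1 = q.1 → p = q := by
  induction items with
  | nil => intro p hp; simp at hp
  | cons a t ih =>
    rw [List.map_cons, List.nodup_cons] at hnd
    intro p hp q hq he
    rcases List.mem_cons.1 hp with hp1 | hp2 <;> rcases List.mem_cons.1 hq with hq1 | hq2
    · rw [hp1, hq1]
    · exfalso; apply hnd.1
      have hm : q.1 ∈ List.map Prod.fst t := List.mem_map_of_mem hq2
      rw [hp1] at he; rw [he]; exact hm
    · exfalso; apply hnd.1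
      have hm : p.1 ∈ List.map Prod.fst t := List.mem_map_of_mem hp2
      rw [hq1] at he; rw [← he]; exact hm
    · exact ih hnd.2 p hp2 q hq2 he

lemma nodup_keys_insert (d : PySem.Dict String (List String)) (k : String) (v : List String)
    (hnd : (d.items.map Prod.fst).Nodup) : ((d.insert k v).items.map Prod.fst).Nodup := by
  rw [PySem.Dict.items_insert]
  by_cases h : d.contains k = true
  · rw [if_pos h]
    have : (List.map (fun p : String × List String => if (p.1 == k) = true then (k, v) else p) d.items).map Prod.fst
        = d.items.map Prod.fst := by
      rw [List.map_map]
      apply List.map_congr_left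
      intro p hp
      by_cases hk : p.1 = k <;> simp [hk]
    rw [this]; exact hnd
  · rw [if_neg h]
    have h' := h
    simp only [PySem.Dict.contains] at h'
    rw [List.map_append]
    simp only [List.map_cons, List.map_nil, List.nodup_append]
    refine ⟨hnd, List.nodup_singleton _, ?_⟩
    intro x hx b hb
    have hbk : b = k := by simpa using hb
    subst hbk
    intro hxk
    subst hxk
    obtain ⟨p, hp, hpk⟩ := List.mem_map.1 hx
    exact h' (List.any_eq_true.2 ⟨p, hp, by simp [hpk]⟩)

lemma insert_self_of_nodup (d : PySem.Dict String (List String)) (k : String) (v : List String)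
    (hnd : (d.items.map Prod.fst).Nodup) (hget : d.get? k = some v) : d.insert k v = d := by
  simp only [PySem.Dict.get?] at hget
  obtain ⟨q, hq, h2⟩ := Option.map_eq_some_iff.1 hget
  have hqk : (q.1 == k) = true := by have := List.find?_some hq; exact this
  have hqmem : q ∈ d.items := List.mem_of_find?_eq_some hq
  have hc : d.contains k = true := by
    simp only [PySem.Dict.contains, List.any_eq_true]
    exact ⟨q, hqmem, hqk⟩
  apply PySem.Dict.ext
  rw [PySem.Dict.items_insert, if_pos hc]
  conv_rhs => rw [← List.map_id d.items]
  apply List.map_congr_left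
  intro p hp
  by_cases hk : p.1 = k
  · have hq1 : q.1 = k := by simpa using hqk
    have hpq : p = q := key_unique d.items hnd p hp q hqmem (by rw [hk, hq1])
    have hkv : (k, v) = q := by rw [← hq1, ← h2]
    simp only [id_eq, hk]
    rw [if_pos (by simp), hkv, hpq]
  · simp [hk]

lemma dedup_singleton (x : String) : PySem.List.dedup [x] = [x] := by
  simp [PySem.List.dedup_eq_ofList, PySem.Set.ofList, PySem.Set.add, PySem.Set.empty]

lemma dedup_append_mem (v : List String) (x : String) (h : x ∈ v) :
    PySem.List.dedup (v ++ [x]) = PySem.List.dedup v := by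
  simp only [PySem.List.dedup_eq_ofList, PySem.Set.ofList, List.foldl_append, List.foldl_cons, List.foldl_nil, PySem.Set.empty]
  have hm : x ∈ PySem.Set.ofList v := (PySem.Set.mem_ofList v x).2 h
  simp only [PySem.Set.ofList, PySem.Set.empty] at hm
  simp [PySem.Set.add, PySem.Set.contains]
  exact hm

lemma dedup_append_not_mem (v : List String) (x : String) (h : ¬ x ∈ v) :
    PySem.List.dedup (v ++ [x]) = PySem.List.dedup v ++ [x] := by
  simp only [PySem.List.dedup_eq_ofList, PySem.Set.ofList, List.foldl_append, List.foldl_cons, List.foldl_nil, PySem.Set.empty]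
  have hm : ¬ x ∈ PySem.Set.ofList v := fun hc => h ((PySem.Set.mem_ofList v x).1 hc)
  simp only [PySem.Set.ofList, PySem.Set.empty] at hm
  simp [PySem.Set.add, PySem.Set.contains]
  exact hm

-- B's two passes fuse into one per-row step
lemma fuse (rows : List (List String)) : ∀ (acc : List (String × String)) (d : PySem.Dict String (List String)),
    List.foldl modStep d (List.foldl pairStep acc rows) = List.foldl rowStepB (List.foldl modStep d acc) rows := by
  induction rows with
  | nil => intro acc d; simp
  | cons r rs ih =>
    intro acc d
    simp only [List.foldl_cons]
    rw [ih]
    congr 1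
    show List.foldl modStep d (pairStep acc r) = rowStepB (List.foldl modStep d acc) r
    unfold pairStep rowStepB
    by_cases h : PySem.List.pyGetD r 1 "" ≠ "" <;> simp [h, List.foldl_append]

-- one step preserves the dedup relation
lemma step_rel (d : PySem.Dict String (List String)) (row : List String)
    (hnd : (d.items.map Prod.fst).Nodup) :
    rowStepA (mapDedup d) row = mapDedup (rowStepB d row) := by
  unfold rowStepA rowStepB modStep PySem.Dict.modify
  by_cases hff : PySem.List.pyGetD row 1 "" ≠ ""
  · rw [if_pos hff, if_pos hff]
    dsimp only
    set b := ((PySem.Str.pyGet? (PySem.List.pyGetD row 1 "") 0).map (fun c => String.mk [c])).getD "" ++ ":" ++ get_full_body_part (PySem.List.pyGetD row 1 "") with hb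
    set t := get_terminal_feature (PySem.List.pyGetD row 1 "") with ht
    rw [contains_mapDedup]
    by_cases hc : d.contains b = true
    · obtain ⟨v, hv⟩ := get?_some_of_contains d b hc
      have hgd : d.getD b [] = v := by simp [PySem.Dict.getD, hv]
      have hgmd : (mapDedup d).getD b [] = PySem.List.dedup v := by
        simp [PySem.Dict.getD, get?_mapDedup, hv]
      rw [hc, if_neg (by simp : ¬ (true = false)), hgd, insert_mapDedup]
      by_cases hmem : t ∈ v
      · have hnmem : ¬ t ∉ (mapDedup d).getD b [] := by
          rw [hgmd]; simp only [not_not, PySem.List.mem_dedup]; exact hmem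
        rw [if_neg hnmem, dedup_append_mem v t hmem]
        exact (insert_self_of_nodup (mapDedup d) b (PySem.List.dedup v)
          (by simpa [mapDedup, List.map_map, Function.comp_def] using hnd)
          (by rw [get?_mapDedup, hv]; rfl)).symm
      · have hnmem : t ∉ (mapDedup d).getD b [] := by
          rw [hgmd]; rw [PySem.List.mem_dedup]; exact hmem
        rw [if_pos hnmem, dedup_append_not_mem v t hmem, hgmd]
    · have hc' : d.contains b = false := by simpa using hc
      have hgd : d.getD b [] = [] := by simp [PySem.Dict.getD, get?_none_of_not_contains d b hc']
      rw [hc', if_pos rfl, hgd, insert_mapDedup]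
      rw [show ([] : List String) ++ [t] = [t] from rfl, dedup_singleton]
  · rw [if_neg hff, if_neg hff]

lemma nodup_keys_rowStepB (d : PySem.Dict String (List String)) (row : List String)
    (hnd : (d.items.map Prod.fst).Nodup) : ((rowStepB d row).items.map Prod.fst).Nodup := by
  unfold rowStepB modStep PySem.Dict.modify
  by_cases h : PySem.List.pyGetD row 1 "" ≠ ""
  · rw [if_pos h]
    exact nodup_keys_insert _ _ _ hnd
  · rw [if_neg h]
    exact hnd

-- main invariant: A's fold over the data rows is the value-wise dedup of B's fused fold
lemma main_inv (rows : List (List String)) : ∀ (d : PySem.Dict String (List String)),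
    (d.items.map Prod.fst).Nodup →
    List.foldl rowStepA (mapDedup d) rows = mapDedup (List.foldl rowStepB d rows) := by
  induction rows with
  | nil => intro d _; simp
  | cons r rs ih =>
    intro d hnd
    simp only [List.foldl_cons]
    rw [step_rel d r hnd]
    exact ih (rowStepB d r) (nodup_keys_rowStepB d r hnd)

-- ===== VERDICT (by name: the statement is the Claim_ definition above) =====
theorem build_features_per_body_part_dictionary_spec : Claim_equal_build_features_per_body_part_dictionary := by
  intro l _ _
  show build_features_per_body_part_dictionary l = build_features_per_body_part_dictionary_alt l
  have hA : build_features_per_body_part_dictionary l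
      = (List.foldl (fun acc j => rowStepA acc (PySem.List.pyGetD l j []))
          (PySem.Dict.mk []) (PySem.List.pyRange 1 (PySem.List.len l))).items := rfl
  rw [PySem.List.foldl_pyRange_pyGetD l ([] : List String) rowStepA (PySem.Dict.mk []) (by norm_num : (0:Int) ≤ 1)] at hA
  have hB : build_features_per_body_part_dictionary_alt l
      = (mapDedup (List.foldl modStep (PySem.Dict.mk [])
          (List.foldl pairStep [] (PySem.List.slice l (some 1) none)))).items := rfl
  have hslice : PySem.List.slice l (some 1) none = l.drop 1 := by simp [pysem]
  rw [hA, hB, hslice, fuse]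
  have hstart : (PySem.Dict.mk ([] : List (String × List String))) = mapDedup (PySem.Dict.mk []) := rfl
  rw [List.foldl_nil, hstart, main_inv (l.drop ((1:Int)).toNat) (PySem.Dict.mk []) (by simp)]
  rfl
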